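-- pv_equiv track=rewrite | github.com/mrittickdeb/Efficient-Page-Replacement-Algorithm-Simulator | main.py | mru_algorithm
-- ===== SOURCE A (Python) =====
-- def mru_algorithm(reference_string, num_frames):
--     frames = []
--     page_faults = 0
--     recent_usage = {}
--     result = []
--
--     for i, page in enumerate(reference_string):
--         if page not in frames:
--             if len(frames) < num_frames:
--                 frames.append(page)
--             else:
--                 mru_page = max(frames, key=lambda x: recent_usage[x])
--                 frames[frames.index(mru_page)] = page
--             page_faults += 1
--             fault = "Yes"
--         else:
--             fault = "No"
--
--         recent_usage[page] = i
--         result.append((i + 1, page, list(frames), fault))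
--
--     return result, page_faults
-- ===== SOURCE B (Python) =====
-- def mru_algorithm(reference_string, num_frames):
--     # No timestamp dict, no max scan: a single position scan per step finds the page's
--     # slot; the slot of the previous access IS the MRU victim on a full-frame fault.
--     # Frames are rebuilt immutably; page_faults is derived by counting "Yes" at the end.
--     trace = []
--     frames = []
--     slot = -1  # frame index of the most recently used page
--     i = 0
--     for page in reference_string:
--         j = _pos(frames, page)
--         if j >= 0:
--             slot = j
--             fault = "No"
--         elif len(frames) < num_frames:
--             frames = frames + [page]
--             slot = len(frames) - 1
--             fault = "Yes"
--         else:
--             frames = frames[:slot] + [page] + frames[slot+1:]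
--             fault = "Yes"
--         trace.append((i + 1, page, frames, fault))
--         i += 1
--     return trace, sum(1 for t in trace if t[3] == "Yes")
--
-- def _pos(frames, page):
--     j = 0
--     for q in frames:
--         if q == page:
--             return j
--         j += 1
--     return -1
-- ===== Notes on version B (the rewrite author's own statement) =====
-- stated objective: simpler
-- what changed: B eliminates A's recent_usage timestamp dict and the per-fault max-by-timestamp scan plus separate membership/index passes: a single position scan per step yields the page's slot, the tracked slot of the previous access is the MRU victim replaced by an immutable slice rebuild, and page_faults is derived at the end by counting 'Yes' entries in the trace instead of being accumulated in the loop.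
import Mathlib
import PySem

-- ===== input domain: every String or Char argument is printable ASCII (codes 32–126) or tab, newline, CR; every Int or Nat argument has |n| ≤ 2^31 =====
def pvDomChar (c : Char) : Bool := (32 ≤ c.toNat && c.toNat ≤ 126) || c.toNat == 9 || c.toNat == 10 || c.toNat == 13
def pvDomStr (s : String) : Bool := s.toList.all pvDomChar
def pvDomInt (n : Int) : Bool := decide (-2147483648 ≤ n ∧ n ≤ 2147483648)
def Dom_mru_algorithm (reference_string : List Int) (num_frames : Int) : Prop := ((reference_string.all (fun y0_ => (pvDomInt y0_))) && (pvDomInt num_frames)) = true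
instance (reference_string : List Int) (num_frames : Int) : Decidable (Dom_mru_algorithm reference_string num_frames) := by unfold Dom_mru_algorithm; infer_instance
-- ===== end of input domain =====

-- B drops A's recent_usage timestamp dict and per-fault max scan: one position scan per step
-- finds the page's slot, the previous access's slot is the MRU victim, frames are rebuilt by
-- slicing, and page_faults is derived afterwards by counting "Yes" in the trace (simpler).


-- ===== PORT A =====
-- one loop iteration of A (state: frames, page_faults, recent_usage, result)
def mruStepA (num_frames : Int)
    (st : List Int × Int × PySem.Dict Int Int × List (Int × Int × List Int × String))
    (ip : Int × Int) :
    List Int × Int × PySem.Dict Int Int × List (Int × Int × List Int × String) :=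
  let (frames, page_faults, recent_usage, result) := st
  let (i, page) := ip
  let (frames, page_faults, fault) :=
    if !(frames.contains page) then
      if (frames.length : Int) < num_frames then
        (frames ++ [page], page_faults + 1, "Yes")
      else
        -- recent_usage[x]: inside Pre_ every resident page is a key, so getD is exact here
        match PySem.List.max? frames (fun x => recent_usage.getD x 0) with
        | some mru_page =>
          match PySem.List.index? frames mru_page with
          | some idx => (frames.set idx page, page_faults + 1, "Yes")
          | none => (frames, page_faults + 1, "Yes")  -- unreachable: mru_page ∈ frames
        | none => (frames, page_faults + 1, "Yes")    -- max([]) raises ValueError: excluded by Pre_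
    else (frames, page_faults, "No")
  (frames, page_faults, recent_usage.insert page i,
   result ++ [(i + 1, page, frames, fault)])

def mru_algorithm (reference_string : List Int) (num_frames : Int) :
    (List (Int × Int × List Int × String)) × Int :=
  let st := (PySem.List.enumerate reference_string 0).foldl (mruStepA num_frames)
    ([], 0, PySem.Dict.empty, [])
  (st.2.2.2, st.2.1)

-- ===== PORT B =====
-- _pos: linear scan returning the first index of page in frames, or -1
def mruPos (frames : List Int) (page : Int) (j : Int) : Int :=
  match frames with
  | [] => -1
  | q :: t => if q == page then j else mruPos t page (j + 1)

-- one loop iteration of B (state: trace, frames, slot, i); frames rebuilt immutably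
def mruStepB (num_frames : Int)
    (st : List (Int × Int × List Int × String) × List Int × Int × Int)
    (page : Int) :
    List (Int × Int × List Int × String) × List Int × Int × Int :=
  let (trace, frames, slot, i) := st
  let j := mruPos frames page 0
  let (frames, slot, fault) :=
    if 0 ≤ j then (frames, j, "No")
    else if (frames.length : Int) < num_frames then
      (frames ++ [page], ((frames ++ [page]).length : Int) - 1, "Yes")
    else
      (PySem.List.slice frames none (some slot) ++ [page] ++
         PySem.List.slice frames (some (slot + 1)) none, slot, "Yes")
  (trace ++ [(i + 1, page, frames, fault)], frames, slot, i + 1)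

def mru_algorithm_alt (reference_string : List Int) (num_frames : Int) :
    (List (Int × Int × List Int × String)) × Int :=
  let st := reference_string.foldl (mruStepB num_frames) ([], [], -1, 0)
  (st.1, st.1.foldl (fun acc t => if t.2.2.2 == "Yes" then acc + 1 else acc) 0)

-- ===== PRECONDITION & SPEC =====
-- A raises (ValueError from max([]) ) exactly when the reference string is nonempty and num_frames < 1.
def Pre_mru_algorithm (reference_string : List Int) (num_frames : Int) : Prop :=
  reference_string = [] ∨ 1 ≤ num_frames
instance (reference_string : List Int) (num_frames : Int) : Decidable (Pre_mru_algorithm reference_string num_frames) := by unfold Pre_mru_algorithm; infer_instance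
def pvWitness_mru_algorithm : List Int × Int := ([1, 2, 3, 1, 4, 2], 2)

def Spec_mru_algorithm (reference_string : List Int) (num_frames : Int) (out : (List (Int × Int × List Int × String)) × Int) : Prop := out = mru_algorithm_alt reference_string num_frames
instance (reference_string : List Int) (num_frames : Int) (out : (List (Int × Int × List Int × String)) × Int) : Decidable (Spec_mru_algorithm reference_string num_frames out) := by unfold Spec_mru_algorithm; infer_instance

-- ===== CLAIM (what is proved, stated in full; the proofs are below) =====
def Claim_equal_mru_algorithm : Prop := ∀ (reference_string : List Int) (num_frames : Int), Dom_mru_algorithm reference_string num_frames → Pre_mru_algorithm reference_string num_frames → Spec_mru_algorithm reference_string num_frames (mru_algorithm reference_string num_frames)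

-- ===== LEMMAS AND PROOFS =====

-- mruPos computes the first index (offset by the accumulator), -1 when absent
theorem mruPos_eq (page : Int) : ∀ (frames : List Int) (j : Int),
    mruPos frames page j =
      match PySem.List.index? frames page with
      | some k => j + (k : Int)
      | none => -1 := by
  intro frames
  induction frames with
  | nil => intro j; simp [mruPos, PySem.List.index?]
  | cons q t ih =>
    intro j
    by_cases h : q = page
    · subst h; rw [PySem.List.index?_cons_self]; simp [mruPos]
    · rw [PySem.List.index?_cons_of_ne t h]
      simp only [mruPos, beq_iff_eq, if_neg h, ih (j + 1)]
      cases PySem.List.index? t page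
      · simp
      · simp; ring

theorem max?_eq_of_strict (frames : List Int) (key : Int → Int) (p : Int)
    (hp : p ∈ frames) (hstrict : ∀ x ∈ frames, x ≠ p → key x < key p) :
    PySem.List.max? frames key = some p := by
  cases hm : PySem.List.max? frames key with
  | none =>
    rw [PySem.List.max?_eq_none_iff] at hm
    subst hm; cases hp
  | some m =>
    have hmem := PySem.List.max?_mem hm
    have hmax := PySem.List.max?_isMax hm
    by_cases hmp : m = p
    · subst hmp; rfl
    · have h1 := hstrict m hmem hmp
      have h2 := hmax p hp
      omega

-- loop invariant: slot is the first index of the previously accessed page p, which is the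
-- unique page of frames with maximal timestamp in A's usage dict (= s - 1)
def MruInv (s : Int) (frames : List Int) (usage : PySem.Dict Int Int) (slot : Int) : Prop :=
  (frames = [] ∧ slot = -1) ∨
  (∃ (p : Int) (k : Nat), slot = (k : Int) ∧ PySem.List.index? frames p = some k ∧
    usage.getD p 0 = s - 1 ∧ ∀ x ∈ frames, x ≠ p → usage.getD x 0 < s - 1)

theorem mruInv_step (s : Int) (frames frames' : List Int) (usage : PySem.Dict Int Int)
    (slot : Int) (page : Int) (k : Nat)
    (hinv : MruInv s frames usage slot)
    (hidx : PySem.List.index? frames' page = some k)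
    (hsub : ∀ x ∈ frames', x ≠ page → x ∈ frames) :
    MruInv (s + 1) frames' (usage.insert page s) (k : Int) := by
  right
  refine ⟨page, k, rfl, hidx, ?_, ?_⟩
  · simp [PySem.Dict.getD_insert_self]
  · intro x hx hne
    rw [PySem.Dict.getD_insert, if_neg hne]
    have hxf := hsub x hx hne
    rcases hinv with ⟨hf, _⟩ | ⟨p, _, _, _, hp, hlt⟩
    · rw [hf] at hxf; cases hxf
    · by_cases hxp : x = p
      · subst hxp; omega
      · have := hlt x hxf hxp; omega

theorem mru_loop_eq (l : List Int) (nf : Int) (hnf : 1 ≤ nf) :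
    ∀ (s : Int) (frames : List Int) (usage : PySem.Dict Int Int) (slot : Int)
      (faults : Int) (result : List (Int × Int × List Int × String)),
    MruInv s frames usage slot →
    faults = (result.countP (fun t => t.2.2.2 == "Yes") : Int) →
    (let a := (PySem.List.enumerate l s).foldl (mruStepA nf) (frames, faults, usage, result)
     let b := l.foldl (mruStepB nf) (result, frames, slot, s)
     a.2.2.2 = b.1 ∧ a.2.1 = (b.1.countP (fun t => t.2.2.2 == "Yes") : Int)) := by
  induction l with
  | nil =>
    intro s frames usage slot faults result _ hf
    simpa [PySem.List.enumerate_nil] using hf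
  | cons page t ih =>
    intro s frames usage slot faults result hinv hf
    rw [PySem.List.enumerate_cons]
    simp only [List.foldl_cons]
    by_cases hpm : page ∈ frames
    · -- hit: A takes the "No" branch; B finds j = index of page ≥ 0
      obtain ⟨k, hk⟩ := Option.isSome_iff_exists.mp
        ((PySem.List.index?_isSome_iff frames page).mpr hpm)
      have hpos : mruPos frames page 0 = (k : Int) := by
        rw [mruPos_eq, hk]; simp
      have hinv' : MruInv (s + 1) frames (usage.insert page s) (k : Int) :=
        mruInv_step s frames frames usage slot page k hinv hk (fun x hx _ => hx)
      have hcnt : faults = ((result ++ [(s + 1, page, frames, "No")]).countP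
          (fun t => t.2.2.2 == "Yes") : Int) := by
        simp [List.countP_append, hf]
      simpa [mruStepA, mruStepB, hpm, hpos] using
        ih (s + 1) frames (usage.insert page s) (k : Int) faults
          (result ++ [(s + 1, page, frames, "No")]) hinv' hcnt
    · have hpos : mruPos frames page 0 = -1 := by
        rw [mruPos_eq, (PySem.List.index?_eq_none_iff frames page).mpr hpm]
      by_cases hlen : (frames.length : Int) < nf
      · -- fault with a free frame: both append
        have hidx : PySem.List.index? (frames ++ [page]) page = some frames.length :=
          PySem.List.index?_append_singleton_self frames page hpm
        have hinv' : MruInv (s + 1) (frames ++ [page]) (usage.insert page s)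
            ((frames.length : Nat) : Int) :=
          mruInv_step s frames (frames ++ [page]) usage slot page frames.length hinv hidx
            (by intro x hx hne; simp at hx; tauto)
        have hcnt : faults + 1 = ((result ++ [(s + 1, page, frames ++ [page], "Yes")]).countP
            (fun t => t.2.2.2 == "Yes") : Int) := by
          simp [List.countP_append, hf]
        have := ih (s + 1) (frames ++ [page]) (usage.insert page s)
          ((frames.length : Nat) : Int) (faults + 1)
          (result ++ [(s + 1, page, frames ++ [page], "Yes")]) hinv' hcnt
        simpa [mruStepA, mruStepB, hpm, hpos, hlen] using this
      · -- full-frame fault: frames ≠ [], so the invariant gives slot = index of the MRU page p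
        have hne : frames ≠ [] := by
          intro h; subst h; simp at hlen; omega
        rcases hinv with ⟨hf0, _⟩ | ⟨p, k, hslot, hidx, hpmax, hlt⟩
        · exact absurd hf0 hne
        have hpmem : p ∈ frames := (PySem.List.index?_isSome_iff frames p).mp (by rw [hidx]; rfl)
        have hmax : PySem.List.max? frames (fun x => usage.getD x 0) = some p :=
          max?_eq_of_strict frames _ p hpmem (fun x hx hxp => by have := hlt x hx hxp; omega)
        obtain ⟨hklt, hgetk, _⟩ := PySem.List.getElem_of_index?_eq_some hidx
        -- B's sliced rebuild is A's frames.set k page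
        have hslice : PySem.List.slice frames none (some (k : Int)) ++ [page] ++
            PySem.List.slice frames (some ((k : Int) + 1)) none = frames.set k page := by
          have h1 : PySem.List.slice frames none (some (k : Int)) = frames.take k :=
            PySem.List.slice_to_natCast frames k
          have h2 : PySem.List.slice frames (some ((k : Int) + 1)) none = frames.drop (k + 1) := by
            have : ((k : Int) + 1) = ((k + 1 : Nat) : Int) := by push_cast; ring
            rw [this, PySem.List.slice_from_natCast]
          rw [h1, h2, List.set_eq_take_cons_drop page hklt]
          simp
        -- index of page in the rebuilt frames is k again
        have hidx' : PySem.List.index? (frames.set k page) page = some k := by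
          rw [PySem.List.index?_eq_some_iff]
          refine ⟨frames.take k, frames.drop (k + 1), ?_, by simp [hklt.le], ?_⟩
          · rw [List.set_eq_take_cons_drop page hklt]
          · intro hmem
            exact hpm (List.mem_of_mem_take hmem)
        have hinv' : MruInv (s + 1) (frames.set k page) (usage.insert page s) (k : Int) := by
          refine mruInv_step s frames (frames.set k page) usage slot page k
            (Or.inr ⟨p, k, hslot, hidx, hpmax, hlt⟩) hidx' ?_
          intro x hx hne'
          rcases List.mem_or_eq_of_mem_set hx with h | h
          · exact h
          · exact absurd h hne'
        have hcnt : faults + 1 = ((result ++ [(s + 1, page, frames.set k page, "Yes")]).countP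
            (fun t => t.2.2.2 == "Yes") : Int) := by
          simp [List.countP_append, hf]
        have hstepA : mruStepA nf (frames, faults, usage, result) (s, page) =
            (frames.set k page, faults + 1, usage.insert page s,
             result ++ [(s + 1, page, frames.set k page, "Yes")]) := by
          simp only [mruStepA, hlen, hmax]
          rw [hidx]
          simp [hpm]
        have hstepB : mruStepB nf (result, frames, slot, s) page =
            (result ++ [(s + 1, page, frames.set k page, "Yes")], frames.set k page,
             (k : Int), s + 1) := by
          subst hslot
          simp only [mruStepB, hpos, hlen]
          rw [hslice]
          simp
        rw [hstepA, hstepB]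
        exact ih (s + 1) (frames.set k page) (usage.insert page s) (k : Int) (faults + 1)
          (result ++ [(s + 1, page, frames.set k page, "Yes")]) hinv' hcnt

-- ===== VERDICT (by name: the statement is the Claim_ definition above) =====
theorem mru_algorithm_spec : Claim_equal_mru_algorithm := by
  intro rs nf _ hpre
  unfold Spec_mru_algorithm mru_algorithm mru_algorithm_alt
  rcases hpre with h | h
  · subst h; rfl
  · have := mru_loop_eq rs nf h 0 [] PySem.Dict.empty (-1) 0 [] (Or.inl ⟨rfl, rfl⟩) (by simp)
    simp only at this
    obtain ⟨h1, h2⟩ := this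
    simp [h1, h2, PySem.List.foldl_ite_add_one]
    exact List.countP_congr (fun x _ => by simp)
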